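-- pv_equiv track=rewrite | github.com/RJD02/Programming-Data-Structures-And-Algorithms-Using-Python | assignment3_2.py | splitsum
-- ===== SOURCE A (Python) =====
-- def squareIt(l):
--     sum = 0
--     for i in l:
--         sum += i * i
--     return sum
--
-- def cubeIt(l):
--     sum = 0
--     for i in l:
--         sum += i * i * i
--     return sum
--
-- def splitsum(l):
--     pos, neg = [], []
--     for i in l:
--         if i > 0:
--             pos.append(i)
--         elif i < 0:
--             neg.append(i)
--     positive_sum = squareIt(pos)
--     negative_sum = cubeIt(neg)
--     return [positive_sum, negative_sum]
-- ===== SOURCE B (Python) =====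
-- def splitsum(l):
--     pos_sum = 0
--     neg_sum = 0
--     for i in l:
--         if i > 0:
--             pos_sum += i * i
--         elif i < 0:
--             neg_sum += i * i * i
--     return [pos_sum, neg_sum]
-- ===== Notes on version B (the rewrite author's own statement) =====
-- stated objective: simpler
-- what changed: Single pass with two numeric accumulators replaces building pos/neg intermediate lists and summing them in two separate helper loops.
import Mathlib
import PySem

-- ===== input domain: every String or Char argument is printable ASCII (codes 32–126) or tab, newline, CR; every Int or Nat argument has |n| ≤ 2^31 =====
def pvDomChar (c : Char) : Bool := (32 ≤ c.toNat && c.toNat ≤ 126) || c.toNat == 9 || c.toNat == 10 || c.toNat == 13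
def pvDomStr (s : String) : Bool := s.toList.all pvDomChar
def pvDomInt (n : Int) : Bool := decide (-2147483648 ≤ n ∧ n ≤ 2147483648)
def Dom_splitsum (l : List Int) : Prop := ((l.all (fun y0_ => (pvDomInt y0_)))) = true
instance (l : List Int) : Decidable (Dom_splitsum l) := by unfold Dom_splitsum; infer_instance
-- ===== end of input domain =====

-- B folds the list once into two numeric accumulators instead of building pos/neg lists and summing them in two helper loops (simpler).
-- ===== PORT A =====
def pvSquareIt (l : List Int) : Int := l.foldl (fun sum i => sum + i * i) 0

def pvCubeIt (l : List Int) : Int := l.foldl (fun sum i => sum + i * i * i) 0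

def splitsum (l : List Int) : List Int :=
  let pn := l.foldl (fun (pn : List Int × List Int) i =>
    if i > 0 then (pn.1 ++ [i], pn.2)
    else if i < 0 then (pn.1, pn.2 ++ [i])
    else pn) ([], [])
  [pvSquareIt pn.1, pvCubeIt pn.2]

-- ===== PORT B =====
def splitsum_alt (l : List Int) : List Int :=
  let ss := l.foldl (fun (ss : Int × Int) i =>
    if i > 0 then (ss.1 + i * i, ss.2)
    else if i < 0 then (ss.1, ss.2 + i * i * i)
    else ss) (0, 0)
  [ss.1, ss.2]

-- ===== PRECONDITION & SPEC =====
def Spec_splitsum (l : List Int) (out : List Int) : Prop := out = splitsum_alt l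
instance (l : List Int) (out : List Int) : Decidable (Spec_splitsum l out) := by unfold Spec_splitsum; infer_instance

-- ===== CLAIM (what is proved, stated in full; the proofs are below) =====
def Claim_equal_splitsum : Prop := ∀ (l : List Int), Dom_splitsum l → Spec_splitsum l (splitsum l)

-- ===== LEMMAS AND PROOFS =====

-- ===== VERDICT (by name: the statement is the Claim_ definition above) =====
theorem pv_key (l : List Int) (p n : List Int) (a b : Int) :
    (let pn := l.foldl (fun (pn : List Int × List Int) i =>
        if i > 0 then (pn.1 ++ [i], pn.2)
        else if i < 0 then (pn.1, pn.2 ++ [i])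
        else pn) (p, n)
     [pn.1.foldl (fun sum i => sum + i * i) a, pn.2.foldl (fun sum i => sum + i * i * i) b])
    = (let ss := l.foldl (fun (ss : Int × Int) i =>
        if i > 0 then (ss.1 + i * i, ss.2)
        else if i < 0 then (ss.1, ss.2 + i * i * i)
        else ss) (p.foldl (fun sum i => sum + i * i) a, n.foldl (fun sum i => sum + i * i * i) b)
       [ss.1, ss.2]) := by
  induction l generalizing p n with
  | nil => simp
  | cons x xs ih =>
    simp only [List.foldl_cons]
    split_ifs with h1 h2 <;> simp [ih, List.foldl_append]

theorem splitsum_spec : Claim_equal_splitsum := by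
  intro l _
  unfold Spec_splitsum splitsum splitsum_alt pvSquareIt pvCubeIt
  exact pv_key l [] [] 0 0
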